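-- pv_equiv track=rewrite | github.com/suraj-iitb/algorithm-identification | tbcnn/crawler/data/shell/python3/shell4612002.py | determine_G
-- ===== SOURCE A (Python) =====
-- def determine_G(N):
--     G = [1]
--     for i in range(N):
--         G.append(G[i]*3 + 1)
--         if G[-1] >= N:
--             del G[-1]
--             break
--     return G[::-1]
-- ===== SOURCE B (Python) =====
-- def determine_G(N):
--     # Each Knuth gap equals (3**k - 1) // 2; find the largest admissible k, then
--     # emit the gaps by closed form in descending order (k = 1 always kept).
--     m = 1
--     while (3 ** (m + 1) - 1) // 2 < N:
--         m += 1
--     return [(3 ** j - 1) // 2 for j in range(m, 0, -1)]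
-- ===== Notes on version B (the rewrite author's own statement) =====
-- stated objective: simpler
-- what changed: Each gap is produced independently by the closed form (3**k-1)//2: B first finds the largest admissible exponent m, then emits the gaps directly in descending order via one comprehension, instead of A's list built by the prev*3+1 recurrence with append/delete-last and a final slice-reverse.
import Mathlib
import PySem

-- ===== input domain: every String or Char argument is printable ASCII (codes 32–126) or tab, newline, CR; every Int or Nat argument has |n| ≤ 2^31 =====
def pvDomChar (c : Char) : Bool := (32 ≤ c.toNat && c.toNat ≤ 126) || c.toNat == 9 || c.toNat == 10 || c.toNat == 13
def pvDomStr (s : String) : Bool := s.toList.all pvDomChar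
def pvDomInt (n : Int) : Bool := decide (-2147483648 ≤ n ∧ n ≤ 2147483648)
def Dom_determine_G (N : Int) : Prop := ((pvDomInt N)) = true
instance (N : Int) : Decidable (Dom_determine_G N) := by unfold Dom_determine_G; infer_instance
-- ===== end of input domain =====

-- B replaces A's prev*3+1 append/delete/reverse loop by the closed form (3^k-1)//2
-- emitted directly in descending order (objective: simpler).


-- ===== PORT A =====
-- A's for-loop with break, as structural recursion on the remaining range length
-- (fuel N.toNat = len(range(N)), i the current range element).  G[i] and G[-1] are
-- always in range here, so pyGetD with default 0 is exact.
def determine_G_loopA (N : Int) : Nat → Int → List Int → List Int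
  | 0, _, G => G
  | f + 1, i, G =>
    let G' := G ++ [PySem.List.pyGetD G i 0 * 3 + 1]     -- G.append(G[i]*3 + 1)
    if PySem.List.pyGetD G' (-1) 0 ≥ N then              -- if G[-1] >= N:
      G'.dropLast                                        --   del G[-1]; break
    else
      determine_G_loopA N f (i + 1) G'

def determine_G (N : Int) : List Int :=
  ((PySem.List.slice? (determine_G_loopA N N.toNat 0 [1]) none none (-1)).getD [])  -- G[::-1]

-- ===== PORT B =====
-- B's while loop; fuel 64 is enough on the stated domain (|N| ≤ 2^31 keeps m ≤ 20).
-- m stays ≥ 1, so the exponents (m+1).toNat and j.toNat are exact for Python's 3**_.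
def determine_G_altLoop (N : Int) : Nat → Int → Int
  | 0, m => m
  | f + 1, m =>
    if PySem.Int.floordiv (3 ^ (m + 1).toNat - 1) 2 < N then
      determine_G_altLoop N f (m + 1)
    else m

def determine_G_alt (N : Int) : List Int :=
  let m := determine_G_altLoop N 64 1
  (PySem.List.pyRange m 0 (-1)).map (fun j => PySem.Int.floordiv (3 ^ j.toNat - 1) 2)

-- ===== PRECONDITION & SPEC =====
def Spec_determine_G (N : Int) (out : List Int) : Prop := out = determine_G_alt N
instance (N : Int) (out : List Int) : Decidable (Spec_determine_G N out) := by unfold Spec_determine_G; infer_instance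

-- ===== CLAIM (what is proved, stated in full; the proofs are below) =====
def Claim_equal_determine_G : Prop := ∀ (N : Int), Dom_determine_G N → Spec_determine_G N (determine_G N)

-- ===== LEMMAS AND PROOFS =====

-- gp m = (3^m - 1)/2, the m-th gap, in recursive form
def gp : Nat → Int
  | 0 => 0
  | m + 1 => 3 * gp m + 1

def gps (m : Nat) : List Int := (List.range m).map (fun t => gp (t + 1))

-- the number of gaps A/B emit: the largest m with gp m < N, but at least 1
def MG (N : Int) : Nat := if N ≤ 1 then 1 else Nat.findGreatest (fun m => gp m < N) 20

lemma gp_nonneg (m : Nat) : 0 ≤ gp m := by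
  induction m with
  | zero => simp [gp]
  | succ m ih => simp only [gp]; omega

lemma gp_two_mul (m : Nat) : 2 * gp m + 1 = 3 ^ m := by
  induction m with
  | zero => simp [gp]
  | succ m ih => simp only [gp, pow_succ]; linarith

lemma gp_strictMono : StrictMono gp := by
  apply strictMono_nat_of_lt_succ
  intro n
  have := gp_nonneg n
  simp only [gp]; omega

lemma gp_mono {a b : Nat} (h : a ≤ b) : gp a ≤ gp b := gp_strictMono.monotone h

lemma self_le_gp (m : Nat) : (m : Int) ≤ gp m := by
  induction m with
  | zero => simp [gp]
  | succ m ih => simp only [gp]; push_cast; omega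

lemma floordiv_gp (m : Nat) : PySem.Int.floordiv (3 ^ m - 1) 2 = gp m := by
  have h := gp_two_mul m
  have : (3:Int) ^ m - 1 = 2 * gp m := by omega
  rw [this, PySem.Int.floordiv_eq_ediv_of_pos (by norm_num)]
  exact Int.mul_ediv_cancel_left _ (by norm_num)

lemma MG_pos (N : Int) : 1 ≤ MG N := by
  unfold MG
  split
  · exact le_refl 1
  · rename_i h
    exact Nat.le_findGreatest (by norm_num) (by simp [gp]; omega)

lemma MG_le_20 (N : Int) : MG N ≤ 20 := by
  unfold MG
  split
  · norm_num
  · exact Nat.findGreatest_le 20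

lemma gp_21 : gp 21 = 5230176601 := by decide

-- if gp m < N (for some m ≥ 1, N in domain) then m ≤ MG N
lemma le_MG {N : Int} (hN : N ≤ 2147483648) {m : Nat} (hm : 1 ≤ m)
    (h : gp m < N) : m ≤ MG N := by
  have hN2 : ¬ N ≤ 1 := by
    have := gp_mono hm
    simp [gp] at this
    omega
  have hm20 : m ≤ 20 := by
    by_contra hc
    have : gp 21 ≤ gp m := gp_mono (by omega)
    rw [gp_21] at this
    omega
  unfold MG
  rw [if_neg hN2]
  exact Nat.le_findGreatest hm20 h

-- if gp (m+1) ≥ N (for some m ≥ 1) then MG N ≤ m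
lemma MG_le {N : Int} {m : Nat} (hm : 1 ≤ m) (h : N ≤ gp (m + 1)) : MG N ≤ m := by
  unfold MG
  split
  · exact hm
  · rename_i hN2
    by_contra hc
    have hspec : gp (Nat.findGreatest (fun m => gp m < N) 20) < N :=
      Nat.findGreatest_spec (m := 1) (P := fun m => gp m < N) (by norm_num)
        (by simp [gp]; omega)
    have hmono : gp (m + 1) ≤ gp (Nat.findGreatest (fun m => gp m < N) 20) :=
      gp_mono (by omega)
    omega

lemma gps_succ (m : Nat) : gps (m + 1) = gps m ++ [gp (m + 1)] := by
  simp [gps, List.range_succ]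

lemma gps_reverse (m : Nat) :
    (gps m).reverse = (List.range m).map (fun k => gp (m - k)) := by
  induction m with
  | zero => simp [gps]
  | succ m ih =>
    rw [gps_succ, List.reverse_append]
    simp only [List.reverse_singleton, List.singleton_append, ih,
      List.range_succ_eq_map, List.map_cons, List.map_map]
    congr 1
    apply List.map_congr_left
    intro k hk
    simp [Nat.succ_sub_succ]

-- loop invariant for A: with G = gps (k+1) and i = k, enough fuel yields gps (MG N)
lemma loopA_inv {N : Int} (hN : N ≤ 2147483648) :
    ∀ (f k : Nat), k < MG N → MG N ≤ k + f →
      determine_G_loopA N f (k : Int) (gps (k + 1)) = gps (MG N) := by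
  intro f
  induction f with
  | zero => intro k h1 h2; omega
  | succ f ih =>
    intro k h1 h2
    have hget : PySem.List.pyGetD (gps (k + 1)) (k : Int) 0 = gp (k + 1) := by
      rw [PySem.List.pyGetD_natCast]
      exact PySem.List.getD_map_range _ _ _ _ (by omega)
    have hg : gp (k + 1) * 3 + 1 = gp (k + 1 + 1) := by simp only [gp]; ring
    simp only [determine_G_loopA, hget, hg]
    rw [show gps (k + 1) ++ [gp (k + 1 + 1)] = gps (k + 1 + 1) from (gps_succ (k + 1)).symm]
    have hlast : PySem.List.pyGetD (gps (k + 1 + 1)) (-1) 0 = gp (k + 1 + 1) := by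
      rw [gps_succ (k + 1)]
      exact PySem.List.pyGetD_neg_one_append_singleton _ _ _
    rw [hlast]
    by_cases hc : gp (k + 1 + 1) ≥ N
    · rw [if_pos hc]
      have hle : MG N ≤ k + 1 := MG_le (by omega) hc
      have hk : k + 1 = MG N := by omega
      rw [gps_succ (k + 1), List.dropLast_concat, hk]
    · rw [if_neg hc]
      have hlt : k + 1 + 1 ≤ MG N := le_MG hN (by omega) (lt_of_not_ge hc)
      have hcast : ((k : Int) + 1) = ((k + 1 : Nat) : Int) := by push_cast; ring
      rw [hcast]
      exact ih (k + 1) (by omega) (by omega)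

lemma A_eq {N : Int} (hN : N ≤ 2147483648) :
    determine_G N = (gps (MG N)).reverse := by
  unfold determine_G
  rw [PySem.List.slice?_none_none_neg_one, Option.getD_some]
  congr 1
  have h1 : gps 1 = [1] := by decide
  by_cases h0 : N ≤ 0
  · have : N.toNat = 0 := by omega
    rw [this]
    have : MG N = 1 := by unfold MG; rw [if_pos (by omega)]
    rw [this, ← h1]
    rfl
  · have hM1 : 1 ≤ MG N := MG_pos N
    have hMN : MG N ≤ N.toNat := by
      by_cases hN1 : N ≤ 1
      · have : MG N = 1 := by unfold MG; rw [if_pos hN1]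
        omega
      · have hspec : gp (MG N) < N := by
          unfold MG
          rw [if_neg hN1]
          exact Nat.findGreatest_spec (m := 1) (P := fun m => gp m < N) (by norm_num)
            (by simp [gp]; omega)
        have := self_le_gp (MG N)
        omega
    have := loopA_inv hN N.toNat 0 (by omega) (by omega)
    rw [← h1]
    exact_mod_cast this

-- loop invariant for B's while loop
lemma loopB_inv {N : Int} (hN : N ≤ 2147483648) :
    ∀ (f m : Nat), 1 ≤ m → m ≤ MG N → MG N ≤ m + f →
      determine_G_altLoop N f (m : Int) = (MG N : Int) := by
  intro f
  induction f with
  | zero =>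
    intro m h1 h2 h3
    have : m = MG N := by omega
    simp [determine_G_altLoop, this]
  | succ f ih =>
    intro m h1 h2 h3
    have htn : ((m : Int) + 1).toNat = m + 1 := by omega
    simp only [determine_G_altLoop, htn, floordiv_gp]
    by_cases hc : gp (m + 1) < N
    · rw [if_pos hc]
      have hle : m + 1 ≤ MG N := le_MG hN (by omega) hc
      have : ((m : Int) + 1) = ((m + 1 : Nat) : Int) := by push_cast; ring
      rw [this]
      exact ih (m + 1) (by omega) hle (by omega)
    · rw [if_neg hc]
      have : MG N ≤ m := MG_le h1 (by omega)
      have : m = MG N := by omega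
      rw [this]

lemma B_eq {N : Int} (hN : N ≤ 2147483648) :
    determine_G_alt N = (gps (MG N)).reverse := by
  have hm : determine_G_altLoop N 64 1 = (MG N : Int) := by
    have := loopB_inv hN 64 1 (le_refl 1) (MG_pos N) (by have := MG_le_20 N; omega)
    exact_mod_cast this
  show (PySem.List.pyRange (determine_G_altLoop N 64 1) 0 (-1)).map
      (fun j => PySem.Int.floordiv (3 ^ j.toNat - 1) 2) = (gps (MG N)).reverse
  rw [hm, PySem.List.pyRange_neg_one, gps_reverse]
  have : ((MG N : Int) - 0).toNat = MG N := by omega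
  rw [this, List.map_map]
  apply List.map_congr_left
  intro k hk
  rw [List.mem_range] at hk
  have h1 : ((MG N : Int) - (k : Int)).toNat = MG N - k := by omega
  simp only [Function.comp_apply, h1, floordiv_gp]

-- ===== VERDICT (by name: the statement is the Claim_ definition above) =====
theorem determine_G_spec : Claim_equal_determine_G := by
  intro N hDom
  have hN : N ≤ 2147483648 := by
    have h := hDom
    unfold Dom_determine_G pvDomInt at h
    exact (of_decide_eq_true h).2
  unfold Spec_determine_G
  rw [A_eq hN, B_eq hN]
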